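-- pv_equiv track=rewrite | github.com/JasperHG90/memex | packages/hermes-plugin/src/memex_hermes_plugin/memex/tools.py | _is_unsafe_asset_filename
-- ===== SOURCE A (Python) =====
-- from typing import Any, Protocol
--
-- def _is_unsafe_asset_filename(filename: Any) -> bool:
--     """Reject path-traversal-capable or hidden filenames before they hit the asset store.
--
--     A safe filename is a plain basename: no separators, no parent-dir components,
--     no leading dot, and no control characters. ``add_note_assets`` joins the filename
--     with the vault/note prefix, so traversal here would let a caller escape the note's
--     asset directory.
--     """
--     if not isinstance(filename, str) or not filename:
--         return True
--     if '/' in filename or '\\' in filename: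
--         return True
--     if filename.startswith('.'):
--         return True
--     if '..' in filename:
--         return True
--     for c in filename:
--         if ord(c) < 32:
--             return True
--     return False
-- ===== SOURCE B (Python) =====
-- def _is_unsafe_asset_filename(filename) -> bool:
--     """Single left-to-right scan tracking the previous character; a dot sentinel
--     for prev makes the leading-dot and double-dot rules one rule."""
--     if not isinstance(filename, str) or not filename:
--         return True
--     prev = '.'
--     for c in filename:
--         if c in '/\\' or ord(c) < 32:
--             return True
--         if c == '.' and prev == '.':
--             return True
--         prev = c
--     return False
-- ===== Notes on version B (the rewrite author's own statement) =====
-- stated objective: simpler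
-- what changed: Replaced A's four separate substring/prefix checks plus a dedicated control-character loop by a single left-to-right scan that tracks the previous character, with a dot sentinel unifying the leading-dot and double-dot rules.
import Mathlib
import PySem

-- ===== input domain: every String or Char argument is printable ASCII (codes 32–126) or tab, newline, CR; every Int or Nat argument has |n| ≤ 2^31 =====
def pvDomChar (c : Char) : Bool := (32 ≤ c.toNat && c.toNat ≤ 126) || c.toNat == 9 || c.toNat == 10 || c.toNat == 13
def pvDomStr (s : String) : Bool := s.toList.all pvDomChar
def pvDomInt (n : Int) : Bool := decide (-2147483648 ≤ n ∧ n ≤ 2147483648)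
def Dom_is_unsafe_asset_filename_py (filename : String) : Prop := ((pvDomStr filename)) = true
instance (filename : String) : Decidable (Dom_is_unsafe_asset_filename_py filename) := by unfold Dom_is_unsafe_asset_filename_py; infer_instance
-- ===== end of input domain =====

-- B replaces A's several substring searches plus a character loop by one left-to-right
-- scan tracking the previous character (a dot sentinel merges the leading-dot and double-dot rules);
-- objective: simpler single pass, same True/False outputs.

-- ===== PORT A =====
def is_unsafe_asset_filename_py (filename : String) : Bool :=
  if filename = "" then true
  else if PySem.Str.isIn "/" filename || PySem.Str.isIn "\\" filename then true
  else if PySem.Str.startswith filename "." then true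
  else if PySem.Str.isIn ".." filename then true
  else if filename.toList.any (fun c => decide (c.toNat < 32)) then true
  else false

-- ===== PORT B =====
-- the scan loop of Source B: prev is the previously seen character ('.' sentinel at the start)
def scanB : Char → List Char → Bool
  | _, [] => false
  | prev, c :: rest =>
    if c == '/' || c == '\\' || decide (c.toNat < 32) then true
    else if c == '.' && prev == '.' then true
    else scanB c rest

def is_unsafe_asset_filename_py_alt (filename : String) : Bool :=
  if filename = "" then true
  else scanB '.' filename.toList

-- ===== PRECONDITION & SPEC =====
def Spec_is_unsafe_asset_filename_py (filename : String) (out : Bool) : Prop := out = is_unsafe_asset_filename_py_alt filename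
instance (filename : String) (out : Bool) : Decidable (Spec_is_unsafe_asset_filename_py filename out) := by unfold Spec_is_unsafe_asset_filename_py; infer_instance

-- ===== CLAIM (what is proved, stated in full; the proofs are below) =====
def Claim_equal_is_unsafe_asset_filename_py : Prop := ∀ (filename : String), Dom_is_unsafe_asset_filename_py filename → Spec_is_unsafe_asset_filename_py filename (is_unsafe_asset_filename_py filename)

-- ===== LEMMAS AND PROOFS =====

-- "two adjacent dots somewhere in the list"
def hasDD : List Char → Bool
  | a :: b :: t => (a == '.' && b == '.') || hasDD (b :: t)
  | _ => false

theorem singleton_infix_iff (c : Char) (l : List Char) : [c] <:+: l ↔ c ∈ l := by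
  constructor
  · intro h; exact h.subset (List.mem_singleton_self c)
  · intro h
    obtain ⟨s, t, rfl⟩ := List.append_of_mem h
    exact ⟨s, t, by simp⟩

theorem prefix_dot_iff (l : List Char) : ['.'] <+: l ↔ l.head? = some '.' := by
  cases l with
  | nil => simp
  | cons a t => simp [List.cons_prefix_cons, eq_comm]

theorem dd_infix_iff (l : List Char) : ['.', '.'] <:+: l ↔ hasDD l = true := by
  induction l with
  | nil => simp [hasDD]
  | cons a t ih =>
    rw [List.infix_cons_iff, ih]
    cases t with
    | nil =>
      simp only [hasDD, Bool.false_eq_true, or_false, iff_false]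
      intro h
      have := h.length_le
      simp at this
    | cons b t' =>
      simp only [hasDD, Bool.or_eq_true, Bool.and_eq_true, beq_iff_eq,
        List.cons_prefix_cons, List.nil_prefix, and_true, eq_comm (a := '.'),
        or_assoc]

theorem hasDD_dot_cons (l : List Char) :
    hasDD ('.' :: l) = true ↔ l.head? = some '.' ∨ hasDD l = true := by
  cases l with
  | nil => simp [hasDD]
  | cons b t =>
    simp only [hasDD, Bool.or_eq_true, Bool.and_eq_true, beq_iff_eq,
      List.head?_cons, Option.some.injEq, eq_comm (a := '.')]
    tauto

theorem scanB_true_iff (l : List Char) : ∀ prev : Char,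
    scanB prev l = true ↔
      ((∃ c ∈ l, c = '/' ∨ c = '\\' ∨ c.toNat < 32) ∨ hasDD (prev :: l) = true) := by
  induction l with
  | nil => intro prev; simp [scanB, hasDD]
  | cons c rest ih =>
    intro prev
    show (if c == '/' || c == '\\' || decide (c.toNat < 32) then true
          else if c == '.' && prev == '.' then true else scanB c rest) = true ↔ _
    have hDD : hasDD (prev :: c :: rest) = true ↔
        ((prev = '.' ∧ c = '.') ∨ hasDD (c :: rest) = true) := by
      simp [hasDD]
    by_cases h1 : c = '/' ∨ c = '\\' ∨ c.toNat < 32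
    · have : (c == '/' || c == '\\' || decide (c.toNat < 32)) = true := by
        rcases h1 with h | h | h <;> simp [h]
      simp only [this, if_true]
      simp only [true_iff]
      exact Or.inl ⟨c, by simp, h1⟩
    · have hb : (c == '/' || c == '\\' || decide (c.toNat < 32)) = false := by
        push_neg at h1
        simp [h1.1, h1.2.1, h1.2.2]
      simp only [hb, Bool.false_eq_true, if_false]
      by_cases h2 : c = '.' ∧ prev = '.'
      · have : (c == '.' && prev == '.') = true := by simp [h2.1, h2.2]
        simp only [this, if_true, true_iff]
        exact Or.inr (hDD.mpr (Or.inl ⟨h2.2, h2.1⟩))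
      · have : (c == '.' && prev == '.') = false := by
          rcases Decidable.not_and_iff_or_not.mp h2 with h | h <;> simp [h]
        simp only [this, Bool.false_eq_true, if_false]
        rw [ih c, hDD]
        constructor
        · rintro (⟨d, hd, hdd⟩ | hd)
          · exact Or.inl ⟨d, List.mem_cons_of_mem _ hd, hdd⟩
          · exact Or.inr (Or.inr hd)
        · rintro (⟨d, hd, hdd⟩ | (⟨hp, hc⟩ | hd))
          · rcases List.mem_cons.mp hd with rfl | hd
            · exact absurd hdd h1
            · exact Or.inl ⟨d, hd, hdd⟩
          · exact absurd ⟨hc, hp⟩ h2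
          · exact Or.inr hd

theorem A_true_iff (f : String) (hf : ¬ f = "") :
    is_unsafe_asset_filename_py f = true ↔
      ('/' ∈ f.toList ∨ '\\' ∈ f.toList ∨ f.toList.head? = some '.' ∨
       hasDD f.toList = true ∨ ∃ c ∈ f.toList, c.toNat < 32) := by
  unfold is_unsafe_asset_filename_py
  simp only [hf, if_false]
  have h1 : PySem.Str.isIn "/" f = true ↔ '/' ∈ f.toList := by
    rw [PySem.Str.isIn_iff_infix]; exact singleton_infix_iff _ _
  have h2 : PySem.Str.isIn "\\" f = true ↔ '\\' ∈ f.toList := by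
    rw [PySem.Str.isIn_iff_infix]; exact singleton_infix_iff _ _
  have h3 : PySem.Str.startswith f "." = true ↔ f.toList.head? = some '.' := by
    simp only [PySem.Str.startswith_eq]
    rw [PySem.Chars.startswith_iff]; exact prefix_dot_iff _
  have h4 : PySem.Str.isIn ".." f = true ↔ hasDD f.toList = true := by
    rw [PySem.Str.isIn_iff_infix]; exact dd_infix_iff _
  split_ifs with c1 c2 c3 c4 <;>
    simp_all [List.any_eq_true] <;> tauto

theorem B_true_iff (f : String) (hf : ¬ f = "") :
    is_unsafe_asset_filename_py_alt f = true ↔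
      ('/' ∈ f.toList ∨ '\\' ∈ f.toList ∨ f.toList.head? = some '.' ∨
       hasDD f.toList = true ∨ ∃ c ∈ f.toList, c.toNat < 32) := by
  unfold is_unsafe_asset_filename_py_alt
  simp only [hf, if_false]
  rw [scanB_true_iff, hasDD_dot_cons]
  constructor
  · rintro (⟨c, hc, (rfl | rfl | h)⟩ | (hh | hd))
    · exact Or.inl hc
    · exact Or.inr (Or.inl hc)
    · exact Or.inr (Or.inr (Or.inr (Or.inr ⟨c, hc, h⟩)))
    · exact Or.inr (Or.inr (Or.inl hh))
    · exact Or.inr (Or.inr (Or.inr (Or.inl hd)))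
  · rintro (h | h | h | h | ⟨c, hc, h⟩)
    · exact Or.inl ⟨'/', h, Or.inl rfl⟩
    · exact Or.inl ⟨'\\', h, Or.inr (Or.inl rfl)⟩
    · exact Or.inr (Or.inl h)
    · exact Or.inr (Or.inr h)
    · exact Or.inl ⟨c, hc, Or.inr (Or.inr h)⟩

-- ===== VERDICT (by name: the statement is the Claim_ definition above) =====
theorem is_unsafe_asset_filename_py_spec : Claim_equal_is_unsafe_asset_filename_py := by
  intro f _
  unfold Spec_is_unsafe_asset_filename_py
  by_cases hf : f = ""
  · subst hf; rfl
  · rw [Bool.eq_iff_iff, A_true_iff f hf, B_true_iff f hf]
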